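-- pv_equiv track=rewrite | github.com/arvinn-boop/comp115-capu | lab6_arvin.py | temp_category
-- ===== SOURCE A (Python) =====
-- def temp_category(temps):
--     hot = 0
--     mild = 0
--     cold = 0
--     for t in temps:
--         if t >= 30:
--             hot += 1
--         elif t >= 15:
--             mild += 1
--         else:
--             cold += 1
--     return [hot, mild, cold]
-- ===== SOURCE B (Python) =====
-- def temp_category(temps):
--     L = list(temps)
--     hot = sum(1 for t in L if t >= 30)
--     mild = sum(1 for t in L if 15 <= t < 30)
--     cold = len(L) - hot - mild
--     return [hot, mild, cold]
-- ===== Notes on version B (the rewrite author's own statement) =====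
-- stated objective: idiomatic
-- what changed: Replaces the single branching accumulator loop with independent predicate-count passes (hot and mild via sum of comparisons, cold by subtraction from the length).
import Mathlib
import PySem

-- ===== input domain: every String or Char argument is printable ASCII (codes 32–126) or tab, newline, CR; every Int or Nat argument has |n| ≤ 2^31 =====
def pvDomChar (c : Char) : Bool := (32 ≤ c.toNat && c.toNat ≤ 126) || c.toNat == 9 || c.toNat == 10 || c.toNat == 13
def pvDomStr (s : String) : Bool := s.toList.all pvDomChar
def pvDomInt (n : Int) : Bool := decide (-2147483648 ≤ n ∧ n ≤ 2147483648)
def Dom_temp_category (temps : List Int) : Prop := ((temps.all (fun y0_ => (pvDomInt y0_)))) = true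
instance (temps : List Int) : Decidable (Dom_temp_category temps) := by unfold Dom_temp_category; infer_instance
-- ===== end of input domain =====

-- B replaces A's single branching loop with independent predicate-count passes (idiomatic; same asymptotic cost).

-- ===== PORT A =====
-- fused pass: fold carrying (hot, mild, cold)
def temp_category (temps : List Int) : List Int :=
  let s := temps.foldl (fun (acc : Int × Int × Int) t =>
    if t ≥ 30 then (acc.1 + 1, acc.2.1, acc.2.2)
    else if t ≥ 15 then (acc.1, acc.2.1 + 1, acc.2.2)
    else (acc.1, acc.2.1, acc.2.2 + 1)) (0, 0, 0)
  [s.1, s.2.1, s.2.2]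

-- ===== PORT B =====
-- three independent counts (cold via length minus the others), as in Source B
def temp_category_alt (temps : List Int) : List Int :=
  let hot : Int := (temps.countP (fun t => 30 ≤ t) : Nat)
  let mild : Int := (temps.countP (fun t => 15 ≤ t ∧ t < 30) : Nat)
  let cold : Int := (temps.length : Int) - hot - mild
  [hot, mild, cold]

-- ===== PRECONDITION & SPEC =====
def Spec_temp_category (temps : List Int) (out : List Int) : Prop := out = temp_category_alt temps
instance (temps : List Int) (out : List Int) : Decidable (Spec_temp_category temps out) := by unfold Spec_temp_category; infer_instance

-- ===== CLAIM (what is proved, stated in full; the proofs are below) =====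
def Claim_equal_temp_category : Prop := ∀ (temps : List Int), Dom_temp_category temps → Spec_temp_category temps (temp_category temps)

-- ===== LEMMAS AND PROOFS =====
-- loop invariant: the fold starting from any accumulator adds the per-bucket counts
theorem temp_category_fold_inv (temps : List Int) (h m c : Int) :
    temps.foldl (fun (acc : Int × Int × Int) t =>
      if t ≥ 30 then (acc.1 + 1, acc.2.1, acc.2.2)
      else if t ≥ 15 then (acc.1, acc.2.1 + 1, acc.2.2)
      else (acc.1, acc.2.1, acc.2.2 + 1)) (h, m, c)
    = (h + (temps.countP (fun t => 30 ≤ t) : Nat),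
       m + (temps.countP (fun t => 15 ≤ t ∧ t < 30) : Nat),
       c + ((temps.length : Int) - (temps.countP (fun t => 30 ≤ t) : Nat)
            - (temps.countP (fun t => 15 ≤ t ∧ t < 30) : Nat))) := by
  induction temps generalizing h m c with
  | nil => simp
  | cons x xs ih =>
    simp only [List.foldl_cons, List.countP_cons, List.length_cons]
    by_cases h30 : (30:Int) ≤ x
    · rw [if_pos h30]
      rw [ih]
      have : ¬ ((15:Int) ≤ x ∧ x < 30) := by omega
      simp [h30, this]
      push_cast
      omega
    · rw [if_neg h30]
      by_cases h15 : (15:Int) ≤ x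
      · rw [if_pos h15, ih]
        have hm : ((15:Int) ≤ x ∧ x < 30) := by omega
        simp [h30, hm]
        push_cast
        omega
      · rw [if_neg h15, ih]
        have hm : ¬ ((15:Int) ≤ x ∧ x < 30) := by omega
        simp [h30, hm]
        push_cast
        omega

-- ===== VERDICT (by name: the statement is the Claim_ definition above) =====
theorem temp_category_spec : Claim_equal_temp_category := by
  intro temps _
  unfold Spec_temp_category temp_category temp_category_alt
  simp only [temp_category_fold_inv]
  simp
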